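-- pv_equiv track=rewrite | github.com/meh9184/coding-test-practice | midasit/test1.py | count_deletion_lines
-- ===== SOURCE A (Python) =====
-- def count_deletion_lines(A):
--     count = 0
--
--     for i in range(len(A)):
--         if 2 in A[i]:
--             return 0
--         elif A[i].count(1) == 4:
--             count += 1
--
--     return count
-- ===== SOURCE B (Python) =====
-- def count_deletion_lines(A):
--     if any(2 in row for row in A):
--         return 0
--     return sum(1 for row in A if row.count(1) == 4)
-- ===== Notes on version B (the rewrite author's own statement) =====
-- stated objective: simpler
-- what changed: Replaces A's single fused index loop with early return by two independent passes: a standalone any-scan for a 2, then a comprehension sum counting rows with four 1s.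
import Mathlib
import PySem

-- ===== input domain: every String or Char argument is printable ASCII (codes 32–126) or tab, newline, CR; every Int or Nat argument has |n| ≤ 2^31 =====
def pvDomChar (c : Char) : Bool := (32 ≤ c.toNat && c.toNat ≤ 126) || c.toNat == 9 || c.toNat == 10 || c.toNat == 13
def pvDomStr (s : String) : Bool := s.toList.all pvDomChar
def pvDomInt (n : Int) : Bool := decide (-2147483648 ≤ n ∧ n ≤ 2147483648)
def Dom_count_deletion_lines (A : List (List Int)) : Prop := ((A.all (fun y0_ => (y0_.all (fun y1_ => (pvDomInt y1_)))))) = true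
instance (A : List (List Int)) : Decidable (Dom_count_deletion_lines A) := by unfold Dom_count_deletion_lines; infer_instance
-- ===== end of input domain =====

-- B replaces A's fused loop (check-for-2 with early return + count fours) by two independent passes; objective: simpler.

-- ===== PORT A =====
-- A's loop over rows with an accumulator and an early return 0 on a row containing 2
def cdlLoop : List (List Int) → Int → Int
  | [], count => count
  | row :: rest, count =>
    if (2 : Int) ∈ row then 0
    else if PySem.List.count row 1 = 4 then cdlLoop rest (count + 1)
    else cdlLoop rest count

def count_deletion_lines (A : List (List Int)) : Int := cdlLoop A 0

-- ===== PORT B =====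
def count_deletion_lines_alt (A : List (List Int)) : Int :=
  if A.any (fun row => decide ((2 : Int) ∈ row)) then 0
  else ((A.countP (fun row => decide (PySem.List.count row 1 = 4)) : Nat) : Int)

-- ===== PRECONDITION & SPEC =====
def Spec_count_deletion_lines (A : List (List Int)) (out : Int) : Prop := out = count_deletion_lines_alt A
instance (A : List (List Int)) (out : Int) : Decidable (Spec_count_deletion_lines A out) := by unfold Spec_count_deletion_lines; infer_instance

-- ===== CLAIM (what is proved, stated in full; the proofs are below) =====
def Claim_equal_count_deletion_lines : Prop := ∀ (A : List (List Int)), Dom_count_deletion_lines A → Spec_count_deletion_lines A (count_deletion_lines A)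

-- ===== LEMMAS AND PROOFS =====
theorem cdlLoop_eq (A : List (List Int)) (c : Int) :
    cdlLoop A c =
      if A.any (fun row => decide ((2 : Int) ∈ row)) then 0
      else c + ((A.countP (fun row => decide (PySem.List.count row 1 = 4)) : Nat) : Int) := by
  induction A generalizing c with
  | nil => simp [cdlLoop]
  | cons row rest ih =>
    by_cases h2 : (2 : Int) ∈ row
    · simp [cdlLoop, h2]
    · simp [cdlLoop, h2, ih, List.countP_cons]
      split_ifs <;> push_cast <;> ring

-- ===== VERDICT (by name: the statement is the Claim_ definition above) =====
theorem count_deletion_lines_spec : Claim_equal_count_deletion_lines := by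
  intro A _
  unfold Spec_count_deletion_lines count_deletion_lines count_deletion_lines_alt
  rw [cdlLoop_eq]
  split_ifs <;> simp
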